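-- pv_equiv track=rewrite | github.com/pritamSarkar123/Compitative20_21 | pyth/sequenceOfBitsInRange.py | approach2
-- ===== SOURCE A (Python) =====
-- def approach2(N):
--     r=[]
--     def count_(x):
--         c=0
--         while x:
--             c+=1
--             x=x & (x-1)
--         return c
--     for i in range(N+1):
--         r.append(count_(i))
--     return r
-- ===== SOURCE B (Python) =====
-- def approach2(N):
--     # DP on halves: popcount(i) = popcount(i // 2) + (i % 2); O(N) total.
--     if N < 0:
--         return []
--     r = [0]
--     for i in range(1, N + 1):
--         r.append(r[i // 2] + i % 2)
--     return r
-- ===== Notes on version B (the rewrite author's own statement) =====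
-- stated objective: faster
-- what changed: Replaces the per-element Kernighan bit-clearing loop (O(log i) per i) with a dynamic program over halves, popcount(i) = popcount(i//2) + i%2, computing each entry in O(1) from an earlier one.
import Mathlib
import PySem

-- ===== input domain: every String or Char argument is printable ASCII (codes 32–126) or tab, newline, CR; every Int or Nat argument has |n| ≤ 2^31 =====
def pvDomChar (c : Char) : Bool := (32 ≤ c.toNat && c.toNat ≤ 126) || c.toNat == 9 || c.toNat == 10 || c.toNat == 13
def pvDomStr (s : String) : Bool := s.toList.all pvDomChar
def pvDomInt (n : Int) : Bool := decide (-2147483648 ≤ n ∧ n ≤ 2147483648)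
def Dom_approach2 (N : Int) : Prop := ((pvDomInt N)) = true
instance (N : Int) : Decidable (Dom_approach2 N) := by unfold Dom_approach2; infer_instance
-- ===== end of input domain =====

-- B replaces A's per-element Kernighan bit-clearing loop with an O(N) DP over halves
-- (popcount(i) = popcount(i//2) + i%2, each entry computed from an earlier list entry).

-- ===== PORT A =====
-- termination lemma for the Kernighan loop (cited in decreasing_by)
theorem pv_band_pred_toNat_lt (x : Int) (hx : 0 < x) :
    (PySem.Int.band x (x - 1)).toNat < x.toNat := by
  lift x to Nat using le_of_lt hx with m
  have h1 : (m : Int) - 1 = ((m - 1 : Nat) : Int) := by omega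
  rw [h1, PySem.Int.band_natCast]
  have := Nat.and_le_right (n := m) (m := m - 1)
  omega

-- A's inner `count_`: `while x:` runs only on nonnegative x in A (x = i ≥ 0); the
-- guard `0 < x` makes the recursion total — on x < 0 (unreachable from A) Python would loop forever.
def countA (x : Int) (c : Int) : Int :=
  if 0 < x then countA (PySem.Int.band x (x - 1)) (c + 1) else c
termination_by x.toNat
decreasing_by exact pv_band_pred_toNat_lt x (by omega)

def approach2 (N : Int) : List Int :=
  (PySem.List.pyRange 0 (N + 1) 1).foldl (fun r i => r ++ [countA i 0]) []

-- ===== PORT B =====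
def approach2_alt (N : Int) : List Int :=
  if N < 0 then []
  else
    (PySem.List.pyRange 1 (N + 1) 1).foldl
      (fun r i => r ++ [PySem.List.pyGetD r (PySem.Int.floordiv i 2) 0 + PySem.Int.mod i 2]) [0]

-- ===== PRECONDITION & SPEC =====
def Spec_approach2 (N : Int) (out : List Int) : Prop := out = approach2_alt N
instance (N : Int) (out : List Int) : Decidable (Spec_approach2 N out) := by unfold Spec_approach2; infer_instance

-- ===== CLAIM (what is proved, stated in full; the proofs are below) =====
def Claim_equal_approach2 : Prop := ∀ (N : Int), Dom_approach2 N → Spec_approach2 N (approach2 N)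

-- ===== LEMMAS AND PROOFS =====

-- the common abstract value: popcount as an Int-valued function
def pvG (i : Int) : Int := (PySem.Int.bitCount i : Int)

-- bit identities behind Kernighan's step
theorem pv_and_odd (k : Nat) : (2*k+1) &&& (2*k) = 2*k := by
  apply Nat.eq_of_testBit_eq; intro i
  rw [Nat.testBit_and]
  cases i with
  | zero => simp [Nat.testBit_zero]
  | succ j =>
    rw [Nat.testBit_succ, Nat.testBit_succ]
    have h1 : (2*k+1)/2 = k := by omega
    have h2 : (2*k)/2 = k := by omega
    simp [h1, h2]

theorem pv_and_even (j : Nat) : (2*j+2) &&& (2*j+1) = 2*((j+1) &&& j) := by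
  apply Nat.eq_of_testBit_eq; intro i
  rw [Nat.testBit_and]
  cases i with
  | zero => simp [Nat.testBit_zero]
  | succ i =>
    rw [Nat.testBit_succ, Nat.testBit_succ]
    have h1 : (2*j+2)/2 = j+1 := by omega
    have h2 : (2*j+1)/2 = j := by omega
    have h3 : (2*((j+1) &&& j))/2 = (j+1) &&& j := by omega
    rw [h1, h2, Nat.testBit_succ, h3, Nat.testBit_and]

-- popcount of a doubled number
theorem pv_bc_double (k : Nat) : PySem.Int.bitCount ((2*k : Nat) : Int) = PySem.Int.bitCount (k : Int) := by
  rcases Nat.eq_zero_or_pos k with hk | hk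
  · subst hk; norm_num
  · rw [PySem.Int.bitCount_natCast (by omega)]
    have h1 : (2*k) % 2 = 0 := by omega
    have h2 : (2*k) / 2 = k := by omega
    rw [h1, h2]
    omega

theorem pv_bc_double_succ (k : Nat) :
    PySem.Int.bitCount ((2*k+1 : Nat) : Int) = PySem.Int.bitCount (k : Int) + 1 := by
  rw [PySem.Int.bitCount_natCast (by omega)]
  have h1 : (2*k+1) % 2 = 1 := by omega
  have h2 : (2*k+1) / 2 = k := by omega
  rw [h1, h2]; omega

-- Kernighan's invariant: clearing the lowest set bit drops popcount by exactly one
theorem pv_bc_kernighan (m : Nat) (hm : 0 < m) :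
    PySem.Int.bitCount ((m &&& (m-1) : Nat) : Int) + 1 = PySem.Int.bitCount ((m : Nat) : Int) := by
  induction m using Nat.strong_induction_on with
  | _ m ih =>
    rcases Nat.even_or_odd m with he | ho
    · obtain ⟨k, hk⟩ := he
      obtain ⟨j, hj⟩ : ∃ j, m = 2*j+2 := ⟨k-1, by omega⟩
      subst hj
      rw [show 2*j+2-1 = 2*j+1 from by omega, pv_and_even j, pv_bc_double]
      have hIH := ih (j+1) (by omega) (by omega)
      rw [show j+1-1 = j from by omega] at hIH
      rw [hIH, show 2*j+2 = 2*(j+1) from by omega, pv_bc_double]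
    · obtain ⟨k, hk⟩ := ho
      subst hk
      rw [show 2*k+1-1 = 2*k from by omega, pv_and_odd, pv_bc_double, pv_bc_double_succ]

-- A's loop computes popcount
theorem pv_countA (m : Nat) : ∀ c : Int, countA (m : Int) c = c + PySem.Int.bitCount (m : Int) := by
  induction m using Nat.strong_induction_on with
  | _ m ih =>
    intro c
    rcases Nat.eq_zero_or_pos m with hm | hm
    · subst hm; rw [countA]; norm_num
    · rw [countA]
      have hpos : (0:Int) < (m : Int) := by exact_mod_cast hm
      rw [if_pos hpos]
      have h1 : ((m : Nat) : Int) - 1 = ((m - 1 : Nat) : Int) := by omega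
      rw [h1, PySem.Int.band_natCast]
      have hlt : m &&& (m-1) < m := by
        have := Nat.and_le_right (n := m) (m := m - 1); omega
      rw [ih _ hlt]
      have := pv_bc_kernighan m hm
      omega

theorem pv_A_map (N : Int) :
    approach2 N = (PySem.List.pyRange 0 (N + 1) 1).map pvG := by
  unfold approach2
  rw [PySem.List.foldl_append_singleton_eq_map]
  rw [List.nil_append]
  apply List.map_congr_left
  intro i hi
  have h0 : (0:Int) ≤ i := (PySem.List.mem_pyRange_one.mp hi).1
  have hm : i = ((i.toNat : Nat) : Int) := by omega
  rw [hm, pv_countA]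
  simp [pvG]

-- B's loop invariant: after processing 1..k the list is the popcount table for 0..k
theorem pv_B_inv (k : Nat) :
    (PySem.List.pyRange 1 ((k:Int) + 1) 1).foldl
      (fun r i => r ++ [PySem.List.pyGetD r (PySem.Int.floordiv i 2) 0 + PySem.Int.mod i 2]) [0]
    = (PySem.List.pyRange 0 ((k:Int) + 1) 1).map pvG := by
  induction k with
  | zero =>
    rw [PySem.List.pyRange_one_eq_nil (by norm_num)]
    rw [show ((0:Nat):Int) + 1 = 0 + 1 by norm_num, PySem.List.pyRange_one_singleton]
    simp [pvG, List.foldl]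
  | succ k ih =>
    have hcast : ((k+1 : Nat) : Int) + 1 = ((k:Int) + 1) + 1 := by push_cast; ring
    rw [hcast, PySem.List.pyRange_one_succ_right (by omega : (1:Int) ≤ (k:Int) + 1),
        List.foldl_append, ih]
    simp only [List.foldl_cons, List.foldl_nil]
    conv_rhs => rw [PySem.List.pyRange_one_succ_right (by omega : (0:Int) ≤ (k:Int) + 1),
                    List.map_append]
    have hfd : PySem.Int.floordiv ((k:Int) + 1) 2 = (((k+1)/2 : Nat) : Int) := by
      rw [show ((k:Int) + 1) = ((k+1 : Nat) : Int) by push_cast; ring]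
      exact_mod_cast PySem.Int.floordiv_natCast (k+1) 2
    have hmd : PySem.Int.mod ((k:Int) + 1) 2 = (((k+1)%2 : Nat) : Int) := by
      rw [show ((k:Int) + 1) = ((k+1 : Nat) : Int) by push_cast; ring]
      exact_mod_cast PySem.Int.mod_natCast (k+1) 2
    have hget : PySem.List.pyGetD ((PySem.List.pyRange 0 ((k:Int)+1) 1).map pvG)
        (((k+1)/2 : Nat) : Int) 0 = pvG (((k+1)/2 : Nat) : Int) := by
      rw [show ((k:Int) + 1) = ((k+1 : Nat) : Int) by push_cast; ring]
      exact PySem.List.pyGetD_map_pyRange pvG (k+1) ((k+1)/2) 0 (by omega)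
    rw [hfd, hmd, hget]
    congr 1
    have helem : pvG (((k+1)/2 : Nat) : Int) + (((k+1)%2 : Nat) : Int) = pvG ((k+1 : Nat) : Int) := by
      unfold pvG
      conv_rhs => rw [PySem.Int.bitCount_natCast (show 0 < k+1 by omega)]
      omega
    simp only [List.map_cons, List.map_nil]
    rw [show ((k:Int) + 1) = ((k+1 : Nat) : Int) by push_cast; ring, helem]

-- ===== VERDICT (by name: the statement is the Claim_ definition above) =====
theorem approach2_spec : Claim_equal_approach2 := by
  intro N _
  unfold Spec_approach2 approach2_alt
  rw [pv_A_map]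
  by_cases hN : N < 0
  · rw [if_pos hN, PySem.List.pyRange_one_eq_nil (by omega), List.map_nil]
  · rw [if_neg hN]
    have hk : N = ((N.toNat : Nat) : Int) := by omega
    rw [hk, pv_B_inv]
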